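-- pv_equiv track=rewrite | github.com/fitzscott/Azul | refineWeight.py | chkdupes
-- ===== SOURCE A (Python) =====
-- def chkdupes(narr, amax):
--     retval = False
--     for chk in range(amax - 1):
--         cnum = chk + 2
--         multcnt = 0
--         for n in narr:
--             if int(n) % cnum == 0:
--                 multcnt += 1
--         if multcnt == len(narr):
--             retval = True
--             break
--     return (retval)
-- ===== SOURCE B (Python) =====
-- def _gcd(a, b):
--     while b:
--         a, b = b, a % b
--     return a
--
--
-- def _spf(g):
--     # smallest divisor >= 2 of g (g itself if g is prime), trial division to sqrt(g)
--     d = 2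
--     while d * d <= g:
--         if g % d == 0:
--             return d
--         d += 1
--     return g
--
--
-- def chkdupes(narr, amax):
--     if amax < 2:
--         return False
--     g = 0
--     for n in narr:
--         g = _gcd(g, abs(int(n)))
--     if g == 0:
--         return True
--     if g == 1:
--         return False
--     return _spf(g) <= amax
-- ===== Notes on version B (the rewrite author's own statement) =====
-- stated objective: faster
-- what changed: A tests every candidate divisor 2..amax against the whole array; B computes the gcd of the elements in one pass and then decides whether the gcd has a divisor in [2,amax] via its smallest prime factor (trial division up to sqrt(gcd)).
import Mathlib
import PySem

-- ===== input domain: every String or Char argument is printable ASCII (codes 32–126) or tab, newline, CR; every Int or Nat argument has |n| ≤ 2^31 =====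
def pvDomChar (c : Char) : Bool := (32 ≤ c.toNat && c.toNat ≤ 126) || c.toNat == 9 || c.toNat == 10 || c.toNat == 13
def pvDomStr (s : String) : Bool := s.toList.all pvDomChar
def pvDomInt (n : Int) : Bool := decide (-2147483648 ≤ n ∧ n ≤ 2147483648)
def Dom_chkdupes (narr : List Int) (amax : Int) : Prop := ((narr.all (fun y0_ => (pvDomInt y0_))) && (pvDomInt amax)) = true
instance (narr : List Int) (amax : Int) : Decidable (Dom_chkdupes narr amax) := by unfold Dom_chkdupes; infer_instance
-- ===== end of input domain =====

-- B replaces A's scan of every candidate divisor in [2, amax] over the whole array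
-- by one gcd pass plus a smallest-prime-factor test (objective: faster).


-- ===== PORT A =====
-- inner 'for n in narr: if int(n) % cnum == 0: multcnt += 1'
def chkdupesInner (narr : List Int) (cnum : Int) : Int :=
  narr.foldl (fun multcnt n => if PySem.Int.mod n cnum = 0 then multcnt + 1 else multcnt) 0

-- outer 'for chk in range(amax - 1): … break' (break = returning true)
def chkdupesLoop (narr : List Int) : List Int → Bool
  | [] => false
  | chk :: rest =>
      let cnum := chk + 2
      if chkdupesInner narr cnum = PySem.List.len narr then true
      else chkdupesLoop narr rest

def chkdupes (narr : List Int) (amax : Int) : Bool :=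
  chkdupesLoop narr (PySem.List.pyRange 0 (amax - 1) 1)

-- ===== PORT B =====
-- _spf: trial division 'd = 2; while d * d <= g: …'
def spfLoop (g d : Nat) : Nat :=
  if d * d ≤ g then
    if g % d = 0 then d else spfLoop g (d + 1)
  else g
termination_by g + 1 - d
decreasing_by
  have : d ≤ g := by nlinarith
  omega

-- _gcd is Euclid's algorithm on nonnegative ints = Nat.gcd
def chkdupes_alt (narr : List Int) (amax : Int) : Bool :=
  if amax < 2 then false
  else
    let g := narr.foldl (fun g n => Nat.gcd g n.natAbs) 0
    if g = 0 then true
    else if g = 1 then false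
    else decide ((spfLoop g 2 : Int) ≤ amax)

-- ===== PRECONDITION & SPEC =====
def Spec_chkdupes (narr : List Int) (amax : Int) (out : Bool) : Prop := out = chkdupes_alt narr amax
instance (narr : List Int) (amax : Int) (out : Bool) : Decidable (Spec_chkdupes narr amax out) := by unfold Spec_chkdupes; infer_instance

-- ===== CLAIM (what is proved, stated in full; the proofs are below) =====
def Claim_equal_chkdupes : Prop := ∀ (narr : List Int) (amax : Int), Dom_chkdupes narr amax → Spec_chkdupes narr amax (chkdupes narr amax)

-- ===== LEMMAS AND PROOFS =====

theorem chkdupesInner_eq_len_iff (narr : List Int) (c : Int) :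
    chkdupesInner narr c = PySem.List.len narr ↔ ∀ n ∈ narr, c ∣ n := by
  unfold chkdupesInner
  have h := PySem.List.foldl_count_if (fun n => decide (PySem.Int.mod n c = 0)) narr 0
  simp only [decide_eq_true_eq] at h
  rw [h, zero_add, PySem.List.len_eq, Int.natCast_inj, List.countP_eq_length]
  simp [PySem.Int.mod_eq_zero_iff_dvd]

-- A's outer loop with break is existence over the candidate list
theorem chkdupesLoop_true_iff (narr : List Int) (l : List Int) :
    chkdupesLoop narr l = true ↔ ∃ chk ∈ l, ∀ n ∈ narr, (chk + 2) ∣ n := by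
  induction l with
  | nil => simp [chkdupesLoop]
  | cons chk rest ih =>
      simp only [chkdupesLoop]
      by_cases h : chkdupesInner narr (chk + 2) = PySem.List.len narr
      · simp only [if_pos h, true_iff]
        exact ⟨chk, List.mem_cons_self, (chkdupesInner_eq_len_iff narr (chk + 2)).mp h⟩
      · rw [if_neg h, ih]
        constructor
        · rintro ⟨c, hc, hall⟩; exact ⟨c, List.mem_cons_of_mem _ hc, hall⟩
        · rintro ⟨c, hc, hall⟩
          rcases List.mem_cons.mp hc with rfl | hc'
          · exact absurd ((chkdupesInner_eq_len_iff narr (c + 2)).mpr hall) h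
          · exact ⟨c, hc', hall⟩

theorem chkdupes_true_iff (narr : List Int) (amax : Int) :
    chkdupes narr amax = true ↔ ∃ c : Int, 2 ≤ c ∧ c ≤ amax ∧ ∀ n ∈ narr, c ∣ n := by
  unfold chkdupes
  rw [chkdupesLoop_true_iff]
  constructor
  · rintro ⟨chk, hmem, hall⟩
    obtain ⟨h0, h1⟩ := PySem.List.mem_pyRange_one.mp hmem
    exact ⟨chk + 2, by omega, by omega, hall⟩
  · rintro ⟨c, h2, hle, hall⟩
    refine ⟨c - 2, PySem.List.mem_pyRange_one.mpr ⟨by omega, by omega⟩, ?_⟩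
    simpa [sub_add_cancel] using hall

-- d divides the running gcd iff it divides the seed and every |n|
theorem dvd_foldl_gcd_iff (d : Nat) (l : List Int) (a : Nat) :
    d ∣ l.foldl (fun g n => Nat.gcd g n.natAbs) a ↔ d ∣ a ∧ ∀ n ∈ l, d ∣ n.natAbs := by
  induction l generalizing a with
  | nil => simp
  | cons x xs ih =>
      simp only [List.foldl_cons, ih, Nat.dvd_gcd_iff, List.mem_cons]
      constructor
      · rintro ⟨⟨ha, hx⟩, hall⟩
        exact ⟨ha, fun n hn => by rcases hn with rfl | hn; exacts [hx, hall n hn]⟩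
      · rintro ⟨ha, hall⟩
        exact ⟨⟨ha, hall x (Or.inl rfl)⟩, fun n hn => hall n (Or.inr hn)⟩

theorem spfLoop_dvd (g d : Nat) : spfLoop g d ∣ g := by
  fun_induction spfLoop g d with
  | case1 d h hmod => exact Nat.dvd_iff_mod_eq_zero.mpr hmod
  | case2 d h hmod ih => exact ih
  | case3 d h => exact dvd_rfl

theorem spfLoop_two_le (g d : Nat) : 2 ≤ g → 2 ≤ d → 2 ≤ spfLoop g d := by
  fun_induction spfLoop g d with
  | case1 d h hmod => intro _ hd; exact hd
  | case2 d h hmod ih => intro hg _; exact ih hg (by omega)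
  | case3 d h => intro hg _; exact hg

theorem spfLoop_min (g m : Nat) (hg : 1 ≤ g) (hm : 2 ≤ m) (hdvd : m ∣ g) (d : Nat) :
    2 ≤ d → (∀ k, 2 ≤ k → k < d → ¬ k ∣ g) → spfLoop g d ≤ m := by
  fun_induction spfLoop g d with
  | case1 d h hmod =>
      intro hd hbelow
      by_contra hlt
      exact hbelow m hm (by omega) hdvd
  | case2 d h hmod ih =>
      intro hd hbelow
      refine ih (by omega) ?_
      intro k hk2 hkd hkdvd
      rcases Nat.lt_succ_iff_lt_or_eq.mp hkd with hkd' | rfl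
      · exact hbelow k hk2 hkd' hkdvd
      · exact hmod (Nat.dvd_iff_mod_eq_zero.mp hkdvd)
  | case3 d h =>
      intro hd hbelow
      by_contra hlt
      push Not at hlt h
      obtain ⟨q, hmq⟩ := id hdvd
      have hqd : q ∣ g := ⟨m, by rw [hmq, Nat.mul_comm]⟩
      have hq2 : 2 ≤ q := by nlinarith
      rcases Nat.le_total m q with hle | hle
      · have h1 : m * m ≤ g := by nlinarith
        have h2 : m < d := by nlinarith
        exact hbelow m hm h2 hdvd
      · have h1 : q * q ≤ g := by nlinarith
        have h2 : q < d := by nlinarith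
        exact hbelow q hq2 h2 hqd

theorem chkdupes_alt_true_iff (narr : List Int) (amax : Int) :
    chkdupes_alt narr amax = true ↔ ∃ c : Int, 2 ≤ c ∧ c ≤ amax ∧ ∀ n ∈ narr, c ∣ n := by
  unfold chkdupes_alt
  set G := narr.foldl (fun g n => Nat.gcd g n.natAbs) 0 with hG
  have key : ∀ d : Nat, d ∣ G ↔ ∀ n ∈ narr, (d : Int) ∣ n := by
    intro d
    rw [hG, dvd_foldl_gcd_iff]
    simp only [Nat.dvd_zero, true_and]
    constructor
    · intro h n hn
      have h' := h n hn
      rwa [← Int.natAbs_natCast d, Int.natAbs_dvd_natAbs] at h'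
    · intro h n hn
      have h' := h n hn
      rwa [← Int.natAbs_dvd_natAbs, Int.natAbs_natCast] at h'
  by_cases hmax : amax < 2
  · simp only [if_pos hmax, Bool.false_eq_true, false_iff]
    rintro ⟨c, h2, hle, _⟩; omega
  · simp only [if_neg hmax]
    by_cases hG0 : G = 0
    · simp only [if_pos hG0, true_iff]
      exact ⟨2, le_refl _, by omega, (key 2).mp (hG0 ▸ Nat.dvd_zero 2)⟩
    · simp only [if_neg hG0]
      by_cases hG1 : G = 1
      · simp only [if_pos hG1, Bool.false_eq_true, false_iff]
        rintro ⟨c, h2, hle, hall⟩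
        have hdvd : c.natAbs ∣ G := (key c.natAbs).mpr (by
          intro n hn
          rw [Int.natAbs_of_nonneg (by omega : (0:Int) ≤ c)]
          exact hall n hn)
        have := Nat.le_of_dvd (by omega) hdvd
        omega
      · simp only [if_neg hG1, decide_eq_true_eq]
        have hg2 : 2 ≤ G := by
          rcases Nat.lt_or_ge G 2 with h1 | h1
          · omega
          · exact h1
        constructor
        · intro hle
          refine ⟨(spfLoop G 2 : Int), ?_, hle, (key _).mp (spfLoop_dvd G 2)⟩
          exact_mod_cast spfLoop_two_le G 2 hg2 (le_refl _)
        · rintro ⟨c, h2, hle, hall⟩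
          have hdvd : c.natAbs ∣ G := (key c.natAbs).mpr (by
            intro n hn
            rw [Int.natAbs_of_nonneg (by omega : (0:Int) ≤ c)]
            exact hall n hn)
          have hmin : spfLoop G 2 ≤ c.natAbs :=
            spfLoop_min G c.natAbs (by omega) (by omega) hdvd 2 (le_refl _)
              (by intro k hk2 hkd; omega)
          calc (spfLoop G 2 : Int) ≤ (c.natAbs : Int) := by exact_mod_cast hmin
            _ = c := Int.natAbs_of_nonneg (by omega)
            _ ≤ amax := hle

-- ===== VERDICT (by name: the statement is the Claim_ definition above) =====
theorem chkdupes_spec : Claim_equal_chkdupes := by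
  intro narr amax _
  unfold Spec_chkdupes
  rw [← Bool.coe_iff_coe]
  exact (chkdupes_true_iff narr amax).trans (chkdupes_alt_true_iff narr amax).symm
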